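-- pv_equiv track=rewrite | github.com/FUFSoB/proxy-suite-flake | scripts/patch-zapret-config.py | locate_nfqws_block
-- ===== SOURCE A (Python) =====
-- def locate_nfqws_block(lines: list[str]) -> tuple[int, int]:
--     start = None
--     for index, line in enumerate(lines):
--         if line.startswith('NFQWS_OPT="'):
--             start = index
--             break
--     if start is None:
--         raise ValueError("Could not find NFQWS_OPT block in zapret config")
--
--     for index in range(start + 1, len(lines)):
--         if lines[index] == '"':
--             return start, index
--
--     raise ValueError("Could not find the end of the NFQWS_OPT block in zapret config")
-- ===== SOURCE B (Python) =====
-- def locate_nfqws_block(lines: list[str]) -> tuple[int, int]: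
--     starts = [i for i, line in enumerate(lines) if line.startswith('NFQWS_OPT="')]
--     if not starts:
--         raise ValueError("Could not find NFQWS_OPT block in zapret config")
--     start = starts[0]
--     ends = [i for i, line in enumerate(lines) if line == '"']
--     # ends is strictly increasing; binary-search the first end index > start
--     lo, hi = 0, len(ends)
--     while lo < hi:
--         mid = (lo + hi) // 2
--         if ends[mid] <= start:
--             lo = mid + 1
--         else:
--             hi = mid
--     if lo == len(ends):
--         raise ValueError("Could not find the end of the NFQWS_OPT block in zapret config")
--     return start, ends[lo]
-- ===== Notes on version B (the rewrite author's own statement) =====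
-- stated objective: alternative
-- what changed: Replaces A's stateful sequential scans by two comprehensions collecting all start and all end-quote indices, then a binary search on the strictly increasing end-index list for the first end after the first start.
import Mathlib
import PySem

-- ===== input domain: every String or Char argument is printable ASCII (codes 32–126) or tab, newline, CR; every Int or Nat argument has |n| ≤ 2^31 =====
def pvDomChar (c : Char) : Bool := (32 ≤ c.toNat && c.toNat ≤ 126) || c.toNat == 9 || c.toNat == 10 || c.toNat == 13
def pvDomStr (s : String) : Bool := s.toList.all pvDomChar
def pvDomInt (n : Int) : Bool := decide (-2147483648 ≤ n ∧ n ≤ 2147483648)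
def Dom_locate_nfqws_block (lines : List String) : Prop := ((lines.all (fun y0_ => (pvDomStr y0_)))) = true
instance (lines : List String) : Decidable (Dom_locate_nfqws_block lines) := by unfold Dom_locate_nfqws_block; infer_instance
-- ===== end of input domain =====

-- B replaces A's stateful sequential scans by comprehensions collecting all start/end indices
-- plus a binary search on the strictly increasing end-index list; return-value equivalence only
-- (on raising inputs, excluded by Pre_, both Pythons raise the same ValueError).

-- ===== PORT A =====
-- first loop of A: first index whose line starts with 'NFQWS_OPT="'
def pvFindStartA : List String → Nat → Option Nat
  | [], _ => none
  | l :: rest, idx =>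
    if PySem.Str.startswith l "NFQWS_OPT=\"" then some idx else pvFindStartA rest (idx + 1)

-- second loop of A: for index in range(start+1, len(lines)): if lines[index] == '"' (index always in range)
-- fuel = lines.length bounds the remaining iterations; it only makes the recursion structural
def pvFindEndA (lines : List String) : Nat → Nat → Option Nat
  | 0, _ => none
  | fuel + 1, idx =>
    if h : idx < lines.length then
      if lines[idx] = "\"" then some idx else pvFindEndA lines fuel (idx + 1)
    else none

def locate_nfqws_block (lines : List String) : Int × Int :=
  match pvFindStartA lines 0 with
  | none => (0, 0)          -- Python raises ValueError here; excluded by Pre_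
  | some s =>
    match pvFindEndA lines lines.length (s + 1) with
    | some e => ((s : Int), (e : Int))
    | none => (0, 0)        -- Python raises ValueError here; excluded by Pre_

-- ===== PORT B =====
-- B's two comprehensions over enumerate(lines)
def pvStartsB (lines : List String) : List Int :=
  ((PySem.List.enumerate lines).filter (fun p => PySem.Str.startswith p.2 "NFQWS_OPT=\"")).map (fun p => p.1)
def pvEndsB (lines : List String) : List Int :=
  ((PySem.List.enumerate lines).filter (fun p => p.2 == "\"")).map (fun p => p.1)

-- B's binary-search loop; ends[mid] is always in range (mid < hi ≤ len ends), so getD is exact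
-- fuel = len ends bounds the iteration count of Python's while loop (hi - lo shrinks each turn)
def pvBisect (es : List Int) (start : Int) : Nat → Nat → Nat → Nat
  | 0, lo, _ => lo
  | fuel + 1, lo, hi =>
    if h : lo < hi then
      let mid := (lo + hi) / 2
      if es.getD mid 0 ≤ start then pvBisect es start fuel (mid + 1) hi
      else pvBisect es start fuel lo mid
    else lo

def locate_nfqws_block_alt (lines : List String) : Int × Int :=
  match pvStartsB lines with
  | [] => (0, 0)            -- Python raises ValueError here; excluded by Pre_
  | s :: _ =>
    let ends := pvEndsB lines
    let lo := pvBisect ends s ends.length 0 ends.length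
    if lo = ends.length then (0, 0)   -- Python raises ValueError here; excluded by Pre_
    else (s, ends.getD lo 0)

-- ===== PRECONDITION & SPEC =====
-- Pre_ excludes exactly the inputs on which Python A (and B) raises ValueError:
-- those with no 'NFQWS_OPT="' line followed (strictly later) by a line equal to '"'.
def Pre_locate_nfqws_block (lines : List String) : Prop :=
  ∃ i < lines.length, PySem.Str.startswith (lines.getD i "") "NFQWS_OPT=\"" = true ∧
    ∃ j < lines.length, i < j ∧ lines.getD j "" = "\""
instance (lines : List String) : Decidable (Pre_locate_nfqws_block lines) := by
  unfold Pre_locate_nfqws_block; infer_instance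

def pvWitness_locate_nfqws_block : List String := ["NFQWS_OPT=\"x", "y", "\""]

def Spec_locate_nfqws_block (lines : List String) (out : Int × Int) : Prop := out = locate_nfqws_block_alt lines
instance (lines : List String) (out : Int × Int) : Decidable (Spec_locate_nfqws_block lines out) := by unfold Spec_locate_nfqws_block; infer_instance

-- ===== CLAIM =====
def Claim_equal_locate_nfqws_block : Prop := ∀ (lines : List String), Dom_locate_nfqws_block lines → Pre_locate_nfqws_block lines → Spec_locate_nfqws_block lines (locate_nfqws_block lines)

-- ===== LEMMAS AND PROOFS =====

-- A's start scan computes the head of B's starts comprehension.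
lemma startsB_head (lines : List String) :
    ∀ (i : Nat),
      (((PySem.List.enumerate lines (i : Int)).filter
          (fun p => PySem.Str.startswith p.2 "NFQWS_OPT=\"")).map (fun p => p.1)).head? =
        (pvFindStartA lines i).map (fun n => (n : Int)) := by
  induction lines with
  | nil => intro i; simp [PySem.List.enumerate_nil, pvFindStartA]
  | cons l rest ih =>
    intro i
    rw [PySem.List.enumerate_cons]
    unfold pvFindStartA
    rw [List.filter_cons]
    by_cases hs : PySem.Str.startswith l "NFQWS_OPT=\"" = true
    · rw [if_pos hs, if_pos hs, List.map_cons, List.head?_cons]; rfl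
    · rw [if_neg (by simpa using hs), if_neg hs]
      have := ih (i + 1)
      push_cast at this ⊢
      exact this

-- membership characterisation of B's ends comprehension
lemma endsB_mem (lines : List String) (e : Int) :
    e ∈ pvEndsB lines ↔ ∃ (k : Nat) (h : k < lines.length), e = (k : Int) ∧ lines[k] = "\"" := by
  unfold pvEndsB
  simp only [List.mem_map, List.mem_filter, PySem.List.mem_enumerate_iff]
  constructor
  · rintro ⟨p, ⟨⟨k, hk, rfl⟩, hq⟩, rfl⟩
    exact ⟨k, hk, by simpa using hq.symm ▸ rfl, by simpa using hq⟩
  · rintro ⟨k, hk, rfl, hq⟩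
    exact ⟨((k : Int), lines[k]), ⟨⟨k, hk, by simp⟩, by simpa using hq⟩, rfl⟩

-- B's ends list is strictly increasing
lemma endsB_sorted (lines : List String) : (pvEndsB lines).Pairwise (· < ·) := by
  unfold pvEndsB
  rw [List.pairwise_map]
  exact (PySem.List.pairwise_lt_enumerate lines 0).filter _

lemma pairwise_lt_getD_mono {es : List Int} (h : es.Pairwise (· < ·))
    {a b : Nat} (hab : a ≤ b) (hb : b < es.length) :
    es.getD a 0 ≤ es.getD b 0 := by
  rcases Nat.lt_or_ge a b with hlt | hge
  · have := List.pairwise_iff_getElem.mp h a b (by omega) hb hlt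
    rw [List.getD_eq_getElem _ _ (by omega), List.getD_eq_getElem _ _ hb]
    exact le_of_lt this
  · have : a = b := by omega
    subst this; exact le_rfl

-- binary-search correctness via the loop invariant
lemma pvBisect_inv (es : List Int) (start : Int) (hmono : es.Pairwise (· < ·)) :
    ∀ (fuel lo hi : Nat), hi - lo ≤ fuel → lo ≤ hi → hi ≤ es.length →
      (∀ m, m < lo → es.getD m 0 ≤ start) →
      (∀ m, hi ≤ m → m < es.length → start < es.getD m 0) →
      lo ≤ pvBisect es start fuel lo hi ∧ pvBisect es start fuel lo hi ≤ hi ∧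
      (∀ m, m < pvBisect es start fuel lo hi → es.getD m 0 ≤ start) ∧
      (∀ m, pvBisect es start fuel lo hi ≤ m → m < es.length → start < es.getD m 0) := by
  intro fuel
  induction fuel with
  | zero =>
    intro lo hi hf hlh hhl hlow hhigh
    have heq : lo = hi := by omega
    subst heq
    exact ⟨le_rfl, le_rfl, hlow, hhigh⟩
  | succ fuel ih =>
    intro lo hi hf hlh hhl hlow hhigh
    by_cases h : lo < hi
    · unfold pvBisect
      rw [dif_pos h]
      set mid := (lo + hi) / 2 with hmid
      have hm1 : lo ≤ mid := by omega
      have hm2 : mid < hi := by omega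
      by_cases hc : es.getD mid 0 ≤ start
      · rw [if_pos hc]
        obtain ⟨h1, h2, h3, h4⟩ := ih (mid + 1) hi (by omega) (by omega) hhl
          (fun m hm => le_trans (pairwise_lt_getD_mono hmono (by omega) (by omega)) hc) hhigh
        exact ⟨by omega, h2, h3, h4⟩
      · rw [if_neg hc]
        obtain ⟨h1, h2, h3, h4⟩ := ih lo mid (by omega) (by omega) (by omega) hlow
          (fun m hm hml => lt_of_lt_of_le (lt_of_not_ge hc) (pairwise_lt_getD_mono hmono hm hml))
        exact ⟨h1, by omega, h3, h4⟩
    · have heq : lo = hi := by omega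
      subst heq
      unfold pvBisect
      rw [dif_neg (by omega)]
      exact ⟨le_rfl, le_rfl, hlow, hhigh⟩

-- A's end scan: a found end is the least '"' index ≥ the start point
lemma endA_some (lines : List String) :
    ∀ (fuel k e : Nat), lines.length - k ≤ fuel → pvFindEndA lines fuel k = some e →
      k ≤ e ∧ ∃ (_ : e < lines.length), lines[e] = "\"" ∧
        ∀ (j : Nat) (hj : j < lines.length), k ≤ j → j < e → lines[j] ≠ "\"" := by
  intro fuel
  induction fuel with
  | zero =>
    intro k e hf he
    exact absurd he (by simp [pvFindEndA])
  | succ fuel ih =>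
    intro k e hf he
    unfold pvFindEndA at he
    by_cases hk : k < lines.length
    · rw [dif_pos hk] at he
      by_cases hq : lines[k] = "\""
      · rw [if_pos hq] at he
        obtain rfl : k = e := by simpa using he
        exact ⟨le_rfl, hk, hq, fun j hj h1 h2 => by omega⟩
      · rw [if_neg hq] at he
        obtain ⟨h1, h2, h3, h4⟩ := ih (k + 1) e (by omega) he
        refine ⟨by omega, h2, h3, fun j hj hkj hje => ?_⟩
        rcases Nat.eq_or_lt_of_le hkj with rfl | hlt
        · exact hq
        · exact h4 j hj (by omega) hje
    · rw [dif_neg hk] at he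
      exact absurd he (by simp)

lemma endA_none (lines : List String) :
    ∀ (fuel k : Nat), lines.length - k ≤ fuel → pvFindEndA lines fuel k = none →
      ∀ (j : Nat) (hj : j < lines.length), k ≤ j → lines[j] ≠ "\"" := by
  intro fuel
  induction fuel with
  | zero =>
    intro k hf _ j hj hkj
    omega
  | succ fuel ih =>
    intro k hf he j hj hkj
    unfold pvFindEndA at he
    by_cases hk : k < lines.length
    · rw [dif_pos hk] at he
      by_cases hq : lines[k] = "\""
      · rw [if_pos hq] at he; exact absurd he (by simp)
      · rw [if_neg hq] at he
        rcases Nat.eq_or_lt_of_le hkj with rfl | hlt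
        · exact hq
        · exact ih (k + 1) (by omega) he j hj (by omega)
    · omega

-- every element of B's ends list is a nonnegative in-range index
lemma endsB_elem (lines : List String) {m : Nat} (hm : m < (pvEndsB lines).length) :
    ∃ (k : Nat) (_ : k < lines.length),
      (pvEndsB lines).getD m 0 = (k : Int) ∧ lines[k] = "\"" := by
  have hmem : (pvEndsB lines).getD m 0 ∈ pvEndsB lines := by
    rw [List.getD_eq_getElem _ _ hm]; exact List.getElem_mem hm
  obtain ⟨k, hk, hke, hkq⟩ := (endsB_mem lines _).mp hmem
  exact ⟨k, hk, hke, hkq⟩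

lemma ports_agree (lines : List String) :
    locate_nfqws_block lines = locate_nfqws_block_alt lines := by
  unfold locate_nfqws_block locate_nfqws_block_alt
  have hst := startsB_head lines 0
  simp only [Nat.cast_zero] at hst
  have hst' : (pvStartsB lines).head? = (pvFindStartA lines 0).map (fun n => (n : Int)) := hst
  cases hA : pvFindStartA lines 0 with
  | none =>
    rw [hA] at hst'
    rw [List.head?_eq_none_iff.mp hst']
  | some s =>
    rw [hA] at hst'
    obtain ⟨t, hcons⟩ : ∃ t, pvStartsB lines = (s : Int) :: t := by
      cases h : pvStartsB lines with
      | nil => rw [h] at hst'; simp at hst'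
      | cons a t =>
        rw [h] at hst'
        simp only [List.head?_cons, Option.map_some] at hst'
        obtain ha : a = (s : Int) := by simpa using hst'
        exact ⟨t, by rw [ha]⟩
    rw [hcons]
    set es := pvEndsB lines with hes
    obtain ⟨b1, b2, b3, b4⟩ := pvBisect_inv es (s : Int) (endsB_sorted lines)
      es.length 0 es.length (by omega) (by omega) le_rfl (by omega) (by omega)
    set lo := pvBisect es (s : Int) es.length 0 es.length with hlo
    cases hE : pvFindEndA lines lines.length (s + 1) with
    | none =>
      -- no '"' after s: every element of ends is ≤ s, so lo = length
      have hall := endA_none lines lines.length (s + 1) (by omega) hE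
      have hloeq : lo = es.length := by
        by_contra hne
        have hlt : lo < es.length := by omega
        obtain ⟨k, hk, hke, hkq⟩ := endsB_elem lines hlt
        have hgt := b4 lo le_rfl hlt
        rw [hke] at hgt
        have : s + 1 ≤ k := by exact_mod_cast Int.lt_iff_add_one_le.mp hgt
        exact hall k hk this hkq
      simp only [hE]
      rw [if_pos hloeq]
    | some e =>
      obtain ⟨h1, h2, h3, h4⟩ := endA_some lines lines.length (s + 1) e (by omega) hE
      -- e is in ends, so some index m has es[m] = e > s, hence lo < length
      have hemem : (e : Int) ∈ es := (endsB_mem lines _).mpr ⟨e, h2, rfl, h3⟩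
      obtain ⟨m, hm, hme⟩ := List.getElem_of_mem hemem
      have hmD : es.getD m 0 = (e : Int) := by rw [List.getD_eq_getElem _ _ hm]; exact hme
      have hlom : lo ≤ m := by
        by_contra hc
        have := b3 m (by omega)
        rw [hmD] at this
        omega
      have hlolt : lo < es.length := by omega
      -- es[lo] > s, in range, is a '"' index; minimality of e gives es[lo] = e
      obtain ⟨k, hk, hke, hkq⟩ := endsB_elem lines hlolt
      have hgt := b4 lo le_rfl hlolt
      rw [hke] at hgt
      have hks : s + 1 ≤ k := by exact_mod_cast Int.lt_iff_add_one_le.mp hgt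
      have hek : e ≤ k := by
        by_contra hc
        exact h4 k hk hks (by omega) hkq
      have hkle : es.getD lo 0 ≤ (e : Int) := by
        rw [← hmD]
        exact pairwise_lt_getD_mono (endsB_sorted lines) hlom hm
      rw [hke] at hkle
      have hkeq : k = e := by omega
      subst hkeq
      simp only [hE]
      rw [if_neg (by omega), hke]

-- ===== VERDICT =====
theorem locate_nfqws_block_spec : Claim_equal_locate_nfqws_block := by
  intro lines _ _
  unfold Spec_locate_nfqws_block
  exact ports_agree lines
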